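-- pv_equiv track=rewrite | github.com/joshanashakya/dissertation | workspace/dataset/java-python/GeeksForGeeks/2120/A/2.py | encodedChar
-- ===== SOURCE A (Python) =====
-- def encodedChar(string, k):
--
--     n = len(string)
--
--     i = 0
--     while i < n:
--         j = i
--         length = 0
--         freq = 0
--
--         # Find length of substring by
--         # traversing the string until
--         # no digit is found.
--         while j < n and string[j].isalpha():
--             j += 1
--             length += 1
--
--         # Find frequency of preceding substring.
--         while j < n and string[j].isdigit():
--             freq = freq * 10 + int(string[j])
--             j += 1
--
--         # Find the length of the substring
--         # when it is repeated.
--         num = freq * length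
--
--         # If the length of the repeated substring
--         # is less than k then required character
--         # is present in next substring. Subtract
--         # the length of repeated substring from
--         # k to keep account of the number
--         # of characters required to be visited.
--         if k > num:
--             k -= num
--             i = j
--
--         # If length of repeated substring is
--         # more or equal to k then required
--         # character lies in current substring.
--         else:
--             k -= 1
--             k %= length
--             return string[i + k]
--
--     # This is for the case when there are no
--     # repetition in string. e.g. str="abced".
--     return string[k - 1]
-- ===== SOURCE B (Python) =====
-- def encodedChar(string, k):
--     n = len(string)
--     # pass 1: tokenize into segments (start_index, alpha_length, freq)
--     segments = []
--     i = 0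
--     while i < n:
--         j = i
--         while j < n and string[j].isalpha():
--             j += 1
--         length = j - i
--         freq = 0
--         while j < n and string[j].isdigit():
--             freq = freq * 10 + int(string[j])
--             j += 1
--         segments.append((i, length, freq))
--         i = j if j > i else j + 1  # always advance (robust on stray characters)
--     # pass 2: walk the segment list, skipping whole repeated blocks
--     for start, length, freq in segments:
--         num = freq * length
--         if k > num:
--             k -= num
--         else:
--             return string[start + (k - 1) % length]
--     # no segment holds position k: literal/no-repetition fallback
--     return string[k - 1]
-- ===== Notes on version B (the rewrite author's own statement) =====
-- stated objective: alternative
-- what changed: A decides skip-or-return inside one while-loop that rescans as it goes; B first tokenizes the string into a list of (start, alpha_length, freq) segments and then makes a separate pass over that list doing the skip/return arithmetic.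
-- outside the precondition, e.g. on encodedChar('a2]', 1): A returns 'a', B returns 'a'; on encodedChar('a b', 2): A does not finish within the time limit, B returns ' '; on encodedChar('', 1): A raises IndexError, B raises IndexError
import Mathlib
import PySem

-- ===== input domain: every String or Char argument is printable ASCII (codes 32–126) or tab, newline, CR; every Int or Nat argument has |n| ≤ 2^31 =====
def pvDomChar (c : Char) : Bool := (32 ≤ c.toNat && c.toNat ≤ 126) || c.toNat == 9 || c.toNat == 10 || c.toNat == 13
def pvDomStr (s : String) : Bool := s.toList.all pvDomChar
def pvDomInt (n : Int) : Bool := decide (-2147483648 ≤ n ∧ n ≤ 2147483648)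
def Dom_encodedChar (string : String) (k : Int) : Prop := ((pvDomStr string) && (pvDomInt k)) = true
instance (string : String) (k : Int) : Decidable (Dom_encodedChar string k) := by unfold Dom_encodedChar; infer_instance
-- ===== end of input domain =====

-- B re-decomposes A's single skip/return while-loop into two passes (tokenize into a
-- segment list, then scan that list); same cost, objective: alternative decomposition.

-- str.isalpha() / str.isdigit() on one char; exact on the ASCII domain Dom_ admits.
def pvIsAl (c : Char) : Bool := (97 ≤ c.toNat && c.toNat ≤ 122) || (65 ≤ c.toNat && c.toNat ≤ 90)
def pvIsDig (c : Char) : Bool := 48 ≤ c.toNat && c.toNat ≤ 57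
-- int(string[j]) for a single digit char; exact on digits.
def pvDigit (c : Char) : Int := (c.toNat : Int) - 48

-- ===== PORT A =====
-- index loops are ported on the suffix string[j:]; j < n ↔ the suffix is nonempty
-- while j < n and string[j].isalpha(): j += 1; length += 1   (returns j, length, string[j:])
def aAlphaLoop : List Char → Nat → Nat → Nat × Nat × List Char
  | c :: rest, j, length =>
      if pvIsAl c then aAlphaLoop rest (j + 1) (length + 1) else (j, length, c :: rest)
  | [], j, length => (j, length, [])

-- while j < n and string[j].isdigit(): freq = freq * 10 + int(string[j]); j += 1
def aDigitLoop : List Char → Nat → Int → Nat × Int × List Char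
  | c :: rest, j, freq =>
      if pvIsDig c then aDigitLoop rest (j + 1) (freq * 10 + pvDigit c) else (j, freq, c :: rest)
  | [], j, freq => (j, freq, [])

-- the outer while loop over (i, string[i:], k); fuel bounds the iterations (i strictly
-- increases on every terminating run, so len+1 fuel is enough); none = Python raises
-- (ZeroDivisionError / IndexError) or loops forever
def aMain (cs : List Char) : Nat → Nat → List Char → Int → Option Char
  | 0, _, _, _ => none
  | fuel + 1, i, suffix, k =>
    if suffix = [] then PySem.List.pyGet? cs (k - 1)  -- i = n: fall out of the while loop
    else
      let p := aAlphaLoop suffix i 0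
      let q := aDigitLoop p.2.2 p.1 0
      let num : Int := q.2.1 * (p.2.1 : Int)
      if k > num then aMain cs fuel q.1 q.2.2 (k - num)
      else if p.2.1 = 0 then none  -- k %= 0 : ZeroDivisionError
      else PySem.List.pyGet? cs ((i : Int) + PySem.Int.mod (k - 1) (p.2.1 : Int))

def encodedChar (string : String) (k : Int) : String :=
  match aMain string.toList (string.toList.length + 1) 0 string.toList k with
  | some c => String.ofList [c]
  | none => ""  -- A raises or diverges here; excluded by Pre_

-- ===== PORT B =====
-- while j < n and string[j].isalpha(): j += 1   (end index and remaining suffix)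
def bAlphaEnd : List Char → Nat → Nat × List Char
  | c :: rest, j => if pvIsAl c then bAlphaEnd rest (j + 1) else (j, c :: rest)
  | [], j => (j, [])

def bDigits : List Char → Nat → Int → Nat × Int × List Char
  | c :: rest, j, freq =>
      if pvIsDig c then bDigits rest (j + 1) (freq * 10 + pvDigit c) else (j, freq, c :: rest)
  | [], j, freq => (j, freq, [])

-- the scans never lengthen the suffix / move the index left (bTok's termination)
theorem bAlphaEnd_len (s : List Char) (j : Nat) :
    (bAlphaEnd s j).2.length + (bAlphaEnd s j).1 = s.length + j := by
  induction s generalizing j with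
  | nil => simp [bAlphaEnd]
  | cons c rest ih =>
      rw [bAlphaEnd]
      split
      · rw [ih]; simp; omega
      · simp

theorem bDigits_len (s : List Char) (j : Nat) (f : Int) :
    (bDigits s j f).2.2.length + (bDigits s j f).1 = s.length + j := by
  induction s generalizing j f with
  | nil => simp [bDigits]
  | cons c rest ih =>
      rw [bDigits]
      split
      · rw [ih]; simp; omega
      · simp

theorem le_bAlphaEnd (s : List Char) (j : Nat) : j ≤ (bAlphaEnd s j).1 := by
  induction s generalizing j with
  | nil => simp [bAlphaEnd]
  | cons c rest ih =>
      rw [bAlphaEnd]; split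
      · exact le_trans (Nat.le_succ j) (ih (j + 1))
      · simp

theorem le_bDigits (s : List Char) (j : Nat) (f : Int) : j ≤ (bDigits s j f).1 := by
  induction s generalizing j f with
  | nil => simp [bDigits]
  | cons c rest ih =>
      rw [bDigits]; split
      · exact le_trans (Nat.le_succ j) (ih (j + 1) _)
      · simp

-- pass 1: the segment list [(start, alpha_length, freq), …]; `i = j if j > i else j + 1`
def bTok (i : Nat) (suffix : List Char) : List (Nat × Nat × Int) :=
  match hs : suffix with
  | [] => []
  | c :: rest =>
      let p := bAlphaEnd (c :: rest) i
      let q := bDigits p.2 p.1 0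
      (i, p.1 - i, q.2.1) ::
        (if h : i < q.1 then bTok q.1 q.2.2 else bTok (q.1 + 1) q.2.2.tail)
termination_by suffix.length
decreasing_by
  · have h0 : (c :: rest).length = rest.length + 1 := rfl
    have h1 := bAlphaEnd_len (c :: rest) i
    have h2 := bDigits_len (bAlphaEnd (c :: rest) i).2 (bAlphaEnd (c :: rest) i).1 0
    have h5 : i < (bDigits (bAlphaEnd (c :: rest) i).2 (bAlphaEnd (c :: rest) i).1 0).1 := h
    show (bDigits (bAlphaEnd (c :: rest) i).2 (bAlphaEnd (c :: rest) i).1 0).2.2.length < (c :: rest).length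
    omega
  · have h0 : (c :: rest).length = rest.length + 1 := rfl
    have h1 := bAlphaEnd_len (c :: rest) i
    have h2 := bDigits_len (bAlphaEnd (c :: rest) i).2 (bAlphaEnd (c :: rest) i).1 0
    have h3 := le_bAlphaEnd (c :: rest) i
    have h6 := le_bDigits (bAlphaEnd (c :: rest) i).2 (bAlphaEnd (c :: rest) i).1 0
    have h4 : (bDigits (bAlphaEnd (c :: rest) i).2 (bAlphaEnd (c :: rest) i).1 0).2.2.tail.length
        = (bDigits (bAlphaEnd (c :: rest) i).2 (bAlphaEnd (c :: rest) i).1 0).2.2.length - 1 := by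
      simp
    show (bDigits (bAlphaEnd (c :: rest) i).2 (bAlphaEnd (c :: rest) i).1 0).2.2.tail.length < (c :: rest).length
    omega

-- pass 2: walk the segment list
def bFind (cs : List Char) (k : Int) : List (Nat × Nat × Int) → Option Char
  | [] => PySem.List.pyGet? cs (k - 1)
  | (start, length, freq) :: rest =>
    let num : Int := freq * (length : Int)
    if k > num then bFind cs (k - num) rest
    else if length = 0 then none  -- (k-1) % 0 : ZeroDivisionError
    else PySem.List.pyGet? cs ((start : Int) + PySem.Int.mod (k - 1) (length : Int))

def encodedChar_alt (string : String) (k : Int) : String :=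
  match bFind string.toList k (bTok 0 string.toList) with
  | some c => String.ofList [c]
  | none => ""

-- ===== PRECONDITION & SPEC =====
-- the total decoded length Σ freq·length over segments, as one fold over the characters;
-- state: (current alpha-run length, inside a digit run?, current freq, flushed total)
def pvSegStep (st : Nat × Bool × Int × Int) (c : Char) : Nat × Bool × Int × Int :=
  if pvIsAl c then
    if st.2.1 then (1, false, 0, st.2.2.2 + st.2.2.1 * (st.1 : Int))
    else (st.1 + 1, false, 0, st.2.2.2)
  else if pvIsDig c then (st.1, true, st.2.2.1 * 10 + pvDigit c, st.2.2.2)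
  else (0, false, 0, st.2.2.2 + st.2.2.1 * (st.1 : Int))

def pvSegTotal (cs : List Char) : Int :=
  let st := cs.foldl pvSegStep (0, false, 0, 0)
  st.2.2.2 + st.2.2.1 * (st.1 : Int)

-- Pre_ excludes exactly the inputs where the Python A does not return normally:
-- a character that is neither a letter nor a digit makes A's outer loop spin forever
-- (k > 0) or divide by zero (k ≤ 0); the empty string and k beyond the decoded length
-- plus len(string) hit IndexError in `string[k-1]`; k ≤ 0 on a digit-led string hits
-- `k %= 0` (ZeroDivisionError). The stray-character exclusion is by mere presence, so it
-- also drops inputs where A happens to return from an earlier segment before reaching the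
-- stray character (e.g. "a2]" with k=1); A and B agree on those.
def Pre_encodedChar (string : String) (k : Int) : Prop :=
  string.toList ≠ [] ∧
  string.toList.all (fun c => pvIsAl c || pvIsDig c) = true ∧
  (k ≤ 0 → pvIsAl (string.toList.headD ' ') = true) ∧
  (0 < k → k ≤ pvSegTotal string.toList + string.toList.length)
instance (string : String) (k : Int) : Decidable (Pre_encodedChar string k) := by
  unfold Pre_encodedChar; infer_instance

def pvWitness_encodedChar : String × Int := ("ab2c3", 5)

def Spec_encodedChar (string : String) (k : Int) (out : String) : Prop := out = encodedChar_alt string k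
instance (string : String) (k : Int) (out : String) : Decidable (Spec_encodedChar string k out) := by unfold Spec_encodedChar; infer_instance

-- ===== CLAIM (what is proved, stated in full; the proofs are below) =====
def Claim_equal_encodedChar : Prop := ∀ (string : String) (k : Int), Dom_encodedChar string k → Pre_encodedChar string k → Spec_encodedChar string k (encodedChar string k)

-- ===== LEMMAS AND PROOFS =====
-- A's counting alpha scan equals B's end-index scan
theorem aAlpha_eq (s : List Char) (j length : Nat) :
    aAlphaLoop s j length = ((bAlphaEnd s j).1, length + ((bAlphaEnd s j).1 - j), (bAlphaEnd s j).2) := by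
  induction s generalizing j length with
  | nil => simp [aAlphaLoop, bAlphaEnd]
  | cons c rest ih =>
      rw [aAlphaLoop, bAlphaEnd]
      split
      · rw [ih]
        have := le_bAlphaEnd rest (j + 1)
        have heq : length + 1 + ((bAlphaEnd rest (j + 1)).1 - (j + 1)) =
            length + ((bAlphaEnd rest (j + 1)).1 - j) := by omega
        rw [heq]
      · simp

-- the two digit scans are the same loop
theorem aDigit_eq (s : List Char) (j : Nat) (f : Int) : aDigitLoop s j f = bDigits s j f := by
  induction s generalizing j f with
  | nil => rfl
  | cons c rest ih => rw [aDigitLoop, bDigits]; split <;> simp [ih]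

-- the scans only ever return a suffix of their input
theorem bAlphaEnd_subset (s : List Char) (j : Nat) : ∀ c ∈ (bAlphaEnd s j).2, c ∈ s := by
  induction s generalizing j with
  | nil => simp [bAlphaEnd]
  | cons c rest ih =>
      rw [bAlphaEnd]; split
      · intro x hx; exact List.mem_cons_of_mem c (ih (j + 1) x hx)
      · simp

theorem bDigits_subset (s : List Char) (j : Nat) (f : Int) : ∀ c ∈ (bDigits s j f).2.2, c ∈ s := by
  induction s generalizing j f with
  | nil => simp [bDigits]
  | cons c rest ih =>
      rw [bDigits]; split
      · intro x hx; exact List.mem_cons_of_mem c (ih (j + 1) _ x hx)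
      · simp

-- on an all-alphanumeric suffix every iteration advances past i
theorem advance (c : Char) (rest : List Char) (i : Nat)
    (hc : pvIsAl c = true ∨ pvIsDig c = true) :
    i < (bDigits (bAlphaEnd (c :: rest) i).2 (bAlphaEnd (c :: rest) i).1 0).1 := by
  rcases hc with h | h
  · have h1 : bAlphaEnd (c :: rest) i = bAlphaEnd rest (i + 1) := by
      rw [bAlphaEnd, if_pos h]
    rw [h1]
    have := le_bAlphaEnd rest (i + 1)
    have := le_bDigits (bAlphaEnd rest (i + 1)).2 (bAlphaEnd rest (i + 1)).1 0
    omega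
  · have hnotal : pvIsAl c = false := by
      revert h; unfold pvIsAl pvIsDig
      simp only [Bool.and_eq_true, decide_eq_true_eq, Bool.or_eq_false_iff,
        Bool.and_eq_false_iff, decide_eq_false_iff_not, not_le]
      omega
    have h1 : bAlphaEnd (c :: rest) i = (i, c :: rest) := by
      rw [bAlphaEnd, if_neg (by simp [hnotal])]
    rw [h1]
    show i < (bDigits (c :: rest) i 0).1
    rw [bDigits, if_pos h]
    have := le_bDigits rest (i + 1) (0 * 10 + pvDigit c)
    omega

-- the main loop against the two-pass scan
theorem main_eq (cs : List Char) :
    ∀ (fuel : Nat) (suffix : List Char) (i : Nat) (k : Int),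
      (∀ c ∈ suffix, pvIsAl c = true ∨ pvIsDig c = true) → suffix.length < fuel →
      aMain cs fuel i suffix k = bFind cs k (bTok i suffix) := by
  intro fuel
  induction fuel with
  | zero => intro suffix i k _ h; omega
  | succ fuel ih =>
    intro suffix i k hal hfuel
    match suffix with
    | [] => rw [aMain, if_pos rfl, bTok, bFind]
    | c :: rest =>
      have hadv := advance c rest i (hal c List.mem_cons_self)
      rw [aMain, if_neg (by simp), bTok]
      simp only [aAlpha_eq, aDigit_eq, Nat.zero_add, dif_pos hadv]
      rw [bFind]
      by_cases hk : k > (bDigits (bAlphaEnd (c :: rest) i).2 (bAlphaEnd (c :: rest) i).1 0).2.1 *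
          (((bAlphaEnd (c :: rest) i).1 - i : Nat) : Int)
      · rw [if_pos hk, if_pos hk]
        have h0 : (c :: rest).length = rest.length + 1 := rfl
        have h1 := bAlphaEnd_len (c :: rest) i
        have h2 := bDigits_len (bAlphaEnd (c :: rest) i).2 (bAlphaEnd (c :: rest) i).1 0
        have h4 := hadv
        exact ih _ _ _
          (fun x hx => hal x (bAlphaEnd_subset (c :: rest) i x
            (bDigits_subset (bAlphaEnd (c :: rest) i).2 (bAlphaEnd (c :: rest) i).1 0 x hx)))
          (by omega)
      · rw [if_neg hk, if_neg hk]

-- ===== VERDICT (by name: the statement is the Claim_ definition above) =====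
theorem encodedChar_spec : Claim_equal_encodedChar := by
  intro string k _ hpre
  unfold Spec_encodedChar encodedChar encodedChar_alt
  rw [main_eq string.toList (string.toList.length + 1) string.toList 0 k ?_ (by omega)]
  intro c hc
  have h := hpre.2.1
  rw [List.all_eq_true] at h
  rcases Bool.or_eq_true_iff.mp (h c hc) with h' | h'
  · exact Or.inl h'
  · exact Or.inr h'
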